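-- pv_equiv track=rewrite | github.com/AmirDjelidi/recherch-op- | main.py | calculer_penalites
-- ===== SOURCE A (Python) =====
-- def calculer_penalites(couts, solution_initiale):
--     n = len(couts)
--     m = len(couts[0])
--     penalites_lignes = []
--     penalites_colonnes = []
--
--     # Calcul des pénalités pour les lignes
--     for i in range(n):
--         ligne_couts = [(couts[i][j], solution_initiale[i][j]) for j in range(m)]
--         # Filtrer pour obtenir seulement les coûts où il y a des allocations
--         ligne_couts = [cout for cout, quantite in ligne_couts if quantite > 0]
--         if len(ligne_couts) > 1:
--             sorted_couts = sorted(ligne_couts)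
--             penalite = sorted_couts[1] - sorted_couts[0]
--             penalites_lignes.append(penalite)
--         else:
--             penalites_lignes.append(0)  # Pas de pénalité si une seule allocation ou aucune
--
--     # Calcul des pénalités pour les colonnes
--     for j in range(m):
--         colonne_couts = [(couts[i][j], solution_initiale[i][j]) for i in range(n)]
--         # Filtrer pour obtenir seulement les coûts où il y a des allocations
--         colonne_couts = [cout for cout, quantite in colonne_couts if quantite > 0]
--         if len(colonne_couts) > 1:
--             sorted_couts = sorted(colonne_couts)
--             penalite = sorted_couts[1] - sorted_couts[0]
--             penalites_colonnes.append(penalite)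
--         else:
--             penalites_colonnes.append(0)  # Pas de pénalité si une seule allocation ou aucune
--
--     return penalites_lignes, penalites_colonnes
-- ===== SOURCE B (Python) =====
-- def calculer_penalites(couts, solution_initiale):
--     # One pass per line/column keeping the two smallest allocated costs,
--     # instead of filtering and sorting each one.
--     n = len(couts)
--     m = len(couts[0])
--
--     def penalite(paires):
--         b1 = b2 = None
--         for c, q in paires:
--             if q > 0:
--                 if b1 is None or c < b1:
--                     b1, b2 = c, b1
--                 elif b2 is None or c < b2:
--                     b2 = c
--         return b2 - b1 if b2 is not None else 0
--
--     penalites_lignes = [penalite((couts[i][j], solution_initiale[i][j]) for j in range(m)) for i in range(n)]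
--     penalites_colonnes = [penalite((couts[i][j], solution_initiale[i][j]) for i in range(n)) for j in range(m)]
--     return penalites_lignes, penalites_colonnes
-- ===== Notes on version B (the rewrite author's own statement) =====
-- stated objective: alternative
-- what changed: Each line/column penalty is computed in a single pass that tracks the two smallest allocated costs, replacing A's build-filter-sort of every line and column.
import Mathlib
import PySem

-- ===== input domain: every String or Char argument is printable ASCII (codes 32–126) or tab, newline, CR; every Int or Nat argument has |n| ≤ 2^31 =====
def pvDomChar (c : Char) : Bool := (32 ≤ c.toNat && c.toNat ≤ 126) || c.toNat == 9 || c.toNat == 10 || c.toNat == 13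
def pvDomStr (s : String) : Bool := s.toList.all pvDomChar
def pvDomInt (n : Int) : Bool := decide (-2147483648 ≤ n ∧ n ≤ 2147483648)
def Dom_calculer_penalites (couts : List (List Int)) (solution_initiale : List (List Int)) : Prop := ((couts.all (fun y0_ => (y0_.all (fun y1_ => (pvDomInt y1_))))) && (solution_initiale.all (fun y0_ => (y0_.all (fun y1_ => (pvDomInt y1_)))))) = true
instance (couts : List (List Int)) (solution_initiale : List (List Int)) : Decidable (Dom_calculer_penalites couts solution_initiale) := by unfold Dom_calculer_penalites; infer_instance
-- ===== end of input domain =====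

-- B computes each penalty in one pass keeping the two smallest allocated costs,
-- instead of A's filter + sort of every line and column (objective: alternative).

-- ===== PORT A =====
-- the (cost, quantity) pair list both Pythons build for line i / column j
def pvPaireLigne (couts solution_initiale : List (List Int)) (m i : Int) : List (Int × Int) :=
  (PySem.List.pyRange 0 m 1).map (fun j =>
    (PySem.List.pyGetD (PySem.List.pyGetD couts i []) j 0,
     PySem.List.pyGetD (PySem.List.pyGetD solution_initiale i []) j 0))

def pvPaireColonne (couts solution_initiale : List (List Int)) (n j : Int) : List (Int × Int) :=
  (PySem.List.pyRange 0 n 1).map (fun i =>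
    (PySem.List.pyGetD (PySem.List.pyGetD couts i []) j 0,
     PySem.List.pyGetD (PySem.List.pyGetD solution_initiale i []) j 0))

-- A's body for one line/column: filter the allocated costs, sort, second minus first
-- (the pyGetD defaults are never used: the guard ensures indices 0 and 1 are in range)
def pvPenaliteA (l : List (Int × Int)) : Int :=
  let f := (l.filter (fun p => decide (0 < p.2))).map (fun p => p.1)
  if 1 < f.length then
    let s := PySem.List.sorted f (fun x => x) false
    PySem.List.pyGetD s 1 0 - PySem.List.pyGetD s 0 0
  else 0

def calculer_penalites (couts : List (List Int)) (solution_initiale : List (List Int)) : List Int × List Int :=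
  let n : Int := couts.length
  let m : Int := (PySem.List.pyGetD couts 0 []).length
  ((PySem.List.pyRange 0 n 1).map (fun i => pvPenaliteA (pvPaireLigne couts solution_initiale m i)),
   (PySem.List.pyRange 0 m 1).map (fun j => pvPenaliteA (pvPaireColonne couts solution_initiale n j)))

-- ===== PORT B =====
-- B's loop body: update the two smallest allocated costs (b1, b2)
def pvStep (s : Option Int × Option Int) (p : Int × Int) : Option Int × Option Int :=
  if 0 < p.2 then
    match s with
    | (none, b1old) => (some p.1, b1old)          -- b1, b2 = c, b1
    | (some b1, none) => if p.1 < b1 then (some p.1, some b1) else (some b1, some p.1)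
    | (some b1, some b2) =>
        if p.1 < b1 then (some p.1, some b1)
        else if p.1 < b2 then (some b1, some p.1)
        else (some b1, some b2)
  else s

def pvPenaliteB (l : List (Int × Int)) : Int :=
  match l.foldl pvStep (none, none) with
  | (_, none) => 0
  | (b1, some b2) => b2 - b1.getD 0               -- b2 is not None ⇒ b1 is not None

def calculer_penalites_alt (couts : List (List Int)) (solution_initiale : List (List Int)) : List Int × List Int :=
  let n : Int := couts.length
  let m : Int := (PySem.List.pyGetD couts 0 []).length
  ((PySem.List.pyRange 0 n 1).map (fun i => pvPenaliteB (pvPaireLigne couts solution_initiale m i)),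
   (PySem.List.pyRange 0 m 1).map (fun j => pvPenaliteB (pvPaireColonne couts solution_initiale n j)))

-- ===== PRECONDITION & SPEC =====
-- Exactly where the Python A returns: couts non-empty (len(couts[0])), and — unless m = 0,
-- in which case nothing is ever indexed — every row of couts has at least m entries and
-- solution_initiale has at least n rows whose first n rows have at least m entries.
def Pre_calculer_penalites (couts : List (List Int)) (solution_initiale : List (List Int)) : Prop :=
  couts ≠ [] ∧
  ((couts.headD []).length = 0 ∨
    ((∀ row ∈ couts, (couts.headD []).length ≤ row.length) ∧
     couts.length ≤ solution_initiale.length ∧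
     (∀ row ∈ solution_initiale.take couts.length, (couts.headD []).length ≤ row.length)))
instance (couts : List (List Int)) (solution_initiale : List (List Int)) : Decidable (Pre_calculer_penalites couts solution_initiale) := by unfold Pre_calculer_penalites; infer_instance

def pvWitness_calculer_penalites : List (List Int) × List (List Int) :=
  ([[1, 2], [3, 4]], [[1, 1], [1, 0]])

def Spec_calculer_penalites (couts : List (List Int)) (solution_initiale : List (List Int)) (out : List Int × List Int) : Prop := out = calculer_penalites_alt couts solution_initiale
instance (couts : List (List Int)) (solution_initiale : List (List Int)) (out : List Int × List Int) : Decidable (Spec_calculer_penalites couts solution_initiale out) := by unfold Spec_calculer_penalites; infer_instance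

-- ===== CLAIM (what is proved, stated in full; the proofs are below) =====
def Claim_equal_calculer_penalites : Prop := ∀ (couts : List (List Int)) (solution_initiale : List (List Int)), Dom_calculer_penalites couts solution_initiale → Pre_calculer_penalites couts solution_initiale → Spec_calculer_penalites couts solution_initiale (calculer_penalites couts solution_initiale)

-- ===== LEMMAS AND PROOFS =====

-- pvStep over the pair list = pvStep2 over the filtered cost list
def pvStep2 (s : Option Int × Option Int) (c : Int) : Option Int × Option Int :=
  match s with
  | (none, b1old) => (some c, b1old)
  | (some b1, none) => if c < b1 then (some c, some b1) else (some b1, some c)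
  | (some b1, some b2) =>
      if c < b1 then (some c, some b1)
      else if c < b2 then (some b1, some c)
      else (some b1, some b2)

lemma foldl_pvStep_filter (l : List (Int × Int)) (s : Option Int × Option Int) :
    l.foldl pvStep s = ((l.filter (fun p => decide (0 < p.2))).map (fun p => p.1)).foldl pvStep2 s := by
  induction l generalizing s with
  | nil => rfl
  | cons p t ih =>
      by_cases h : 0 < p.2
      · simp [List.foldl, h, pvStep, pvStep2, ih]
      · simp [List.foldl, h, pvStep, ih]

-- the two-smallest fold equals the first two entries of the sorted list
lemma firstTwo_orderedInsert (c : Int) (s : List Int) (hs : s.Pairwise (· ≤ ·)) :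
    (((List.orderedInsert (· ≤ ·) c s))[0]?, ((List.orderedInsert (· ≤ ·) c s))[1]?) =
      pvStep2 (s[0]?, s[1]?) c := by
  match s, hs with
  | [], _ => rfl
  | [a], _ =>
      rcases lt_trichotomy c a with h | h | h
      · simp [List.orderedInsert, pvStep2, le_of_lt h, h]
      · subst h; simp [List.orderedInsert, pvStep2]
      · simp [List.orderedInsert, pvStep2, not_le.mpr h, not_lt.mpr (le_of_lt h)]
  | a :: b :: t, hs =>
      have hab : a ≤ b := (List.pairwise_cons.mp hs).1 b (by simp)
      rcases lt_trichotomy c a with h | h | h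
      · simp [List.orderedInsert, pvStep2, le_of_lt h, h]
      · subst h
        by_cases hb : c < b
        · simp [List.orderedInsert, pvStep2, hb]
        · have hcb : c = b := le_antisymm hab (not_lt.mp hb)
          subst hcb; simp [List.orderedInsert, pvStep2]
      · have h1 : ¬ c ≤ a := not_le.mpr h
        have h2 : ¬ c < a := not_lt.mpr (le_of_lt h)
        by_cases hb : c ≤ b
        · rcases lt_or_eq_of_le hb with h3 | h3
          · simp [List.orderedInsert, pvStep2, h1, h2, hb, h3]
          · subst h3; simp [List.orderedInsert, pvStep2, h1, h2]
        · have h4 : ¬ c < b := not_lt.mpr (le_of_not_ge hb)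
          cases t <;> simp [List.orderedInsert, pvStep2, h1, h2, hb, h4]

lemma sorted_append_singleton (xs : List Int) (c : Int) :
    PySem.List.sorted (xs ++ [c]) (fun x => x) false =
      List.orderedInsert (· ≤ ·) c (PySem.List.sorted xs (fun x => x) false) := by
  refine PySem.List.sorted_id_eq_of_perm_of_pairwise (xs ++ [c]) _ ?_ ?_
  · exact ((List.perm_orderedInsert _ c _).trans
      ((PySem.List.sorted_perm xs _ _).cons c)).trans (List.perm_append_singleton c xs).symm
  · exact List.Pairwise.orderedInsert c _ (PySem.List.sorted_pairwise (key := fun x => x) xs)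

lemma foldl_pvStep2_sorted (cs : List Int) :
    cs.foldl pvStep2 (none, none) =
      ((PySem.List.sorted cs (fun x => x) false)[0]?, (PySem.List.sorted cs (fun x => x) false)[1]?) := by
  induction cs using List.reverseRecOn with
  | nil => rfl
  | append_singleton t c ih =>
      rw [List.foldl_append, List.foldl_cons, List.foldl_nil, ih, sorted_append_singleton,
        firstTwo_orderedInsert _ _ (PySem.List.sorted_pairwise (key := fun x => x) t)]

lemma pvPenalite_eq (l : List (Int × Int)) : pvPenaliteA l = pvPenaliteB l := by
  unfold pvPenaliteA pvPenaliteB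
  rw [foldl_pvStep_filter, foldl_pvStep2_sorted]
  set f := (l.filter (fun p => decide (0 < p.2))).map (fun p => p.1) with hf
  have hlen : (PySem.List.sorted f (fun x => x) false).length = f.length :=
    PySem.List.length_sorted f _ _
  by_cases h : 1 < f.length
  · rw [if_pos h]
    rcases hs : PySem.List.sorted f (fun x => x) false with _ | ⟨a, _ | ⟨b, t⟩⟩
    · rw [hs] at hlen; simp at hlen; omega
    · rw [hs] at hlen; simp at hlen; omega
    · simp [pysem]
  · rw [if_neg h]
    rcases hs : PySem.List.sorted f (fun x => x) false with _ | ⟨a, _ | ⟨b, t⟩⟩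
    · rfl
    · rfl
    · rw [hs] at hlen; simp at hlen; omega

lemma calculer_eq (couts solution_initiale : List (List Int)) :
    calculer_penalites couts solution_initiale = calculer_penalites_alt couts solution_initiale := by
  simp only [calculer_penalites, calculer_penalites_alt, pvPenalite_eq]

-- ===== VERDICT (by name: the statement is the Claim_ definition above) =====
theorem calculer_penalites_spec : Claim_equal_calculer_penalites := by
  intro couts solution_initiale _ _
  unfold Spec_calculer_penalites
  exact calculer_eq couts solution_initiale
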